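-- pv_equiv track=rewrite | github.com/matichorvat/hsst | bin/rtnrewrite.py | range_to_bit_coverage
-- ===== SOURCE A (Python) =====
-- def range_to_bit_coverage(start, end, token_to_node, reference_coverage):
--     aligned_node_list = list()
--
--     token_list = range(start, end + 1)
--     for token in token_list:
--         aligned_node_list.extend(token_to_node[token])
--
--     node_set = set(aligned_node_list)
--     coverage = ['0'] * len(reference_coverage)
--
--     for index, node_id in enumerate(reference_coverage):
--         if node_id in node_set:
--             coverage[index] = '1'
--
--     return ''.join(coverage)
-- ===== SOURCE B (Python) =====
-- def range_to_bit_coverage(start, end, token_to_node, reference_coverage):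
--     # Inverted index: node_id -> all positions where it occurs in reference_coverage.
--     pos_of = {}
--     for index, node_id in enumerate(reference_coverage):
--         pos_of.setdefault(node_id, []).append(index)
--
--     coverage = ['0'] * len(reference_coverage)
--     for token in range(start, end + 1):
--         for node_id in token_to_node[token]:
--             for idx in pos_of.get(node_id, []):
--                 coverage[idx] = '1'
--
--     return ''.join(coverage)
-- ===== Notes on version B (the rewrite author's own statement) =====
-- stated objective: alternative
-- what changed: Instead of collecting aligned nodes, building a set, and scanning reference_coverage with a membership test, B builds an inverted index node_id -> positions in one enumerate pass and then scatters '1' directly into those positions for each node listed in the token range.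
import Mathlib
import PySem

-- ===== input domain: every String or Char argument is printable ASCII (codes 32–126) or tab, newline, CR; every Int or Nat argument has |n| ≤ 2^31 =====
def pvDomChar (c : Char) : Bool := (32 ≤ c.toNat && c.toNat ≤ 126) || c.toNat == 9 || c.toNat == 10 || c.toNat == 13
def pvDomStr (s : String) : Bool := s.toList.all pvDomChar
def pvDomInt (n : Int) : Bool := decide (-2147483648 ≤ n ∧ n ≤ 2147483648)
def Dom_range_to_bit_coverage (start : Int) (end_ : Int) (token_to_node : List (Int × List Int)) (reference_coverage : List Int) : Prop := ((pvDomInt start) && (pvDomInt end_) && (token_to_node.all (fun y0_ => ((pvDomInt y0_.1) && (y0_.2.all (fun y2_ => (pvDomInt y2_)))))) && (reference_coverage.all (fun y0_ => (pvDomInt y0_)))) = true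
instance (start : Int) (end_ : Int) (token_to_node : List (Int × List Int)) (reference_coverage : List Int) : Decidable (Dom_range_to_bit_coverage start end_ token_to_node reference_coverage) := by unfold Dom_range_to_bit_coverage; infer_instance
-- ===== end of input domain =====

-- B replaces A's "collect aligned nodes, build a set, scan reference_coverage with a membership
-- test" by an inverted index node_id -> positions built in one enumerate pass, then scatters '1'
-- into those positions; same cost, different decomposition (objective: alternative).

-- ===== PORT A =====
def range_to_bit_coverage (start : Int) (end_ : Int) (token_to_node : List (Int × List Int)) (reference_coverage : List Int) : String :=
  let aligned_node_list : List Int :=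
    (PySem.List.pyRange start (end_ + 1) 1).foldl
      (fun acc token => acc ++ (PySem.Dict.mk token_to_node).getD token []) []
  let node_set : PySem.Set Int := PySem.Set.ofList aligned_node_list
  let coverage0 : List Char := List.replicate reference_coverage.length '0'
  let coverage : List Char :=
    (PySem.List.enumerate reference_coverage).foldl
      (fun cov p => if PySem.Set.contains node_set p.2 then PySem.List.pySetD cov p.1 '1' else cov)
      coverage0
  String.mk coverage

-- ===== PORT B =====
-- pos_of: inverted index node_id -> list of positions (Source B's first loop)
def pvPosOf (reference_coverage : List Int) : PySem.Dict Int (List Int) :=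
  (PySem.List.enumerate reference_coverage).foldl
    (fun d p => d.modify p.2 [] (fun l => l ++ [p.1])) PySem.Dict.empty

def range_to_bit_coverage_alt (start : Int) (end_ : Int) (token_to_node : List (Int × List Int)) (reference_coverage : List Int) : String :=
  let pos_of := pvPosOf reference_coverage
  let coverage0 : List Char := List.replicate reference_coverage.length '0'
  let coverage : List Char :=
    (PySem.List.pyRange start (end_ + 1) 1).foldl
      (fun cov token =>
        ((PySem.Dict.mk token_to_node).getD token []).foldl
          (fun cov node_id =>
            (pos_of.getD node_id []).foldl
              (fun cov idx => PySem.List.pySetD cov idx '1') cov)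
          cov)
      coverage0
  String.mk coverage

-- ===== PRECONDITION & SPEC =====
-- Pre_ excludes exactly the inputs where Python raises KeyError: some token in
-- range(start, end+1) missing from token_to_node (both A and B raise there).
-- (stated by counting: the distinct keys of token_to_node lying in [start, end_] are as many
-- as the integers in that interval, i.e. every token of the range is a key)
def Pre_range_to_bit_coverage (start : Int) (end_ : Int) (token_to_node : List (Int × List Int)) (reference_coverage : List Int) : Prop :=
  end_ < start ∨
    (((PySem.Set.ofList (token_to_node.map Prod.fst)).countP
      (fun k => decide (start ≤ k ∧ k ≤ end_)) : Nat) : Int) = end_ - start + 1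

instance (start : Int) (end_ : Int) (token_to_node : List (Int × List Int)) (reference_coverage : List Int) : Decidable (Pre_range_to_bit_coverage start end_ token_to_node reference_coverage) := by unfold Pre_range_to_bit_coverage; infer_instance

def pvWitness_range_to_bit_coverage : Int × Int × (List (Int × List Int)) × List Int :=
  (0, 1, [(0, [1]), (1, [0, 2])], [0, 1, 2])

def Spec_range_to_bit_coverage (start : Int) (end_ : Int) (token_to_node : List (Int × List Int)) (reference_coverage : List Int) (out : String) : Prop := out = range_to_bit_coverage_alt start end_ token_to_node reference_coverage
instance (start : Int) (end_ : Int) (token_to_node : List (Int × List Int)) (reference_coverage : List Int) (out : String) : Decidable (Spec_range_to_bit_coverage start end_ token_to_node reference_coverage out) := by unfold Spec_range_to_bit_coverage; infer_instance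

-- ===== CLAIM (what is proved, stated in full; the proofs are below) =====
def Claim_equal_range_to_bit_coverage : Prop := ∀ (start : Int) (end_ : Int) (token_to_node : List (Int × List Int)) (reference_coverage : List Int), Dom_range_to_bit_coverage start end_ token_to_node reference_coverage → Pre_range_to_bit_coverage start end_ token_to_node reference_coverage → Spec_range_to_bit_coverage start end_ token_to_node reference_coverage (range_to_bit_coverage start end_ token_to_node reference_coverage)

-- ===== LEMMAS AND PROOFS =====

-- xs[n] = v at a nonnegative index, as a plain Nat set
lemma pySetD_nat (xs : List Char) (n : Nat) (v : Char) :
    PySem.List.pySetD xs (n : Int) v = if n < xs.length then xs.set n v else xs := by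
  by_cases h : n < xs.length
  · rw [PySem.List.pySetD, PySem.List.pySet?_natCast xs n v h]
    simp [h]
  · have hnone : PySem.List.pySet? xs (n : Int) v = none := by
      rw [PySem.List.pySet?_eq_none_iff]
      simp only [PySem.Raise.InRange]
      omega
    rw [PySem.List.pySetD, hnone]
    simp [h]

-- setting past the end changes nothing
lemma set_oob (l : List Char) (i : Nat) (c : Char) (h : l.length ≤ i) : l.set i c = l := by
  induction l generalizing i with
  | nil => rfl
  | cons x xs ih =>
    cases i with
    | zero => simp at h
    | succ n =>
      show x :: xs.set n c = x :: xs
      rw [ih n (by simpa using h)]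

-- a fold that runs an inner fold per element is a fold over the flatMap
lemma foldl_foldl_eq_flatMap {α β γ : Type} (g : β → List γ) (f : α → γ → α)
    (l : List β) (init : α) :
    l.foldl (fun acc x => (g x).foldl f acc) init = (l.flatMap g).foldl f init := by
  induction l generalizing init with
  | nil => simp
  | cons x xs ih => simp [List.flatMap_cons, List.foldl_append, ih]

-- scattering '1' at nonnegative indices preserves length
lemma setfold_length (idxs : List Int) : ∀ (cov : List Char), (∀ i ∈ idxs, 0 ≤ i) →
    (idxs.foldl (fun c i => PySem.List.pySetD c i '1') cov).length = cov.length := by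
  induction idxs with
  | nil => intro cov _; rfl
  | cons i rest ih =>
    intro cov h0
    obtain ⟨n, rfl⟩ := Int.eq_ofNat_of_zero_le (h0 i (List.mem_cons_self ..))
    simp only [List.foldl_cons]
    rw [ih _ (fun x hx => h0 x (List.mem_cons_of_mem _ hx)), pySetD_nat]
    split <;> simp

-- scattering '1' at nonnegative indices: pointwise characterisation
lemma setfold_getElem? (idxs : List Int) : ∀ (cov : List Char), (∀ i ∈ idxs, 0 ≤ i) →
    ∀ (j : Nat), j < cov.length →
    (idxs.foldl (fun c i => PySem.List.pySetD c i '1') cov)[j]? =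
      if (j : Int) ∈ idxs then some '1' else cov[j]? := by
  induction idxs with
  | nil => intro cov _ j _; simp
  | cons i rest ih =>
    intro cov h0 j hj
    obtain ⟨n, rfl⟩ := Int.eq_ofNat_of_zero_le (h0 i (List.mem_cons_self ..))
    simp only [List.foldl_cons]
    rw [pySetD_nat]
    by_cases hn : n < cov.length
    · rw [if_pos hn,
        ih (cov.set n '1') (fun x hx => h0 x (List.mem_cons_of_mem _ hx)) j (by simpa using hj)]
      by_cases hr : (j : Int) ∈ rest
      · have hm : (j : Int) ∈ (n : Int) :: rest := List.mem_cons_of_mem _ hr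
        simp [hr, hm]
      · rw [if_neg hr, List.getElem?_set]
        by_cases hje : n = j
        · subst hje
          simp [hn, List.mem_cons]
        · have hne2 : ¬ ((j : Int) = (n : Int)) := by omega
          have hmf : ((j : Int) ∈ (n : Int) :: rest) = False := by
            simp [List.mem_cons, hr, hne2]
          simp [hje, hmf]
    · rw [if_neg hn,
        ih cov (fun x hx => h0 x (List.mem_cons_of_mem _ hx)) j hj]
      have hne2 : ¬ ((j : Int) = (n : Int)) := by omega
      by_cases hr : (j : Int) ∈ rest <;> simp [List.mem_cons, hr, hne2]

-- A's write loop produces the pointwise map over reference_coverage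
lemma A_loop (P : Int → Bool) (rc : List Int) : ∀ (k : Nat) (cov : List Char),
    cov.length = k + rc.length → cov.drop k = List.replicate rc.length '0' →
    (PySem.List.enumerate rc (k : Int)).foldl
      (fun c p => if P p.2 then PySem.List.pySetD c p.1 '1' else c) cov
    = cov.take k ++ rc.map (fun nid => if P nid then '1' else '0') := by
  induction rc with
  | nil =>
    intro k cov hlen _
    have h1 : cov.take k = cov := List.take_of_length_le (by simp at hlen; omega)
    simp [PySem.List.enumerate_nil, h1]
  | cons x xs ih =>
    intro k cov hlen hdrop
    rw [PySem.List.enumerate_cons]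
    simp only [List.foldl_cons, List.map_cons]
    have hk : k < cov.length := by simp at hlen; omega
    have hcovget : cov[k] = '0' := by
      have h2 : (cov.drop k)[0]'(by simp [hdrop]) = '0' := by simp [hdrop]
      rw [List.getElem_drop] at h2
      simpa using h2
    have hset : (if P x then PySem.List.pySetD cov ((k : Nat) : Int) '1' else cov)
        = cov.set k (if P x then '1' else '0') := by
      split
      · rw [pySetD_nat, if_pos hk]
      · conv_lhs => rw [← List.set_getElem_self hk]
        rw [hcovget]
    rw [hset]
    have hlen1 : (cov.set k (if P x then '1' else '0')).length = (k + 1) + xs.length := by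
      simp at hlen ⊢; omega
    have hdrop1 : (cov.set k (if P x then '1' else '0')).drop (k + 1)
        = List.replicate xs.length '0' := by
      rw [List.drop_set_of_lt (by omega), ← List.tail_drop, hdrop]
      simp [List.replicate_succ]
    have hstep : ((k : Nat) : Int) + 1 = ((k + 1 : Nat) : Int) := by push_cast; ring
    rw [hstep, ih (k + 1) _ hlen1 hdrop1]
    have htake : (cov.set k (if P x then '1' else '0')).take (k + 1)
        = cov.take k ++ [if P x then '1' else '0'] := by
      rw [List.take_succ, List.take_set,
        set_oob _ _ _ (by rw [List.length_take]; omega), List.getElem?_set]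
      simp [hk]
    rw [htake]
    simp

-- pos_of lookup: the positions of nid in reference_coverage, in order
lemma posOf_getD (rc : List Int) (nid : Int) :
    (pvPosOf rc).getD nid [] =
      ((PySem.List.enumerate rc).filter (fun p => p.2 == nid)).map (fun p => p.1) := by
  unfold pvPosOf
  have h1 : (PySem.List.enumerate rc).foldl
        (fun d p => d.modify p.2 [] (fun l => l ++ [p.1])) PySem.Dict.empty
      = ((PySem.List.enumerate rc).map (fun p => (p.2, p.1))).foldl
        (fun d p => d.modify p.1 [] (fun l => l ++ [p.2])) PySem.Dict.empty := by
    rw [List.foldl_map]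
  rw [h1, PySem.Dict.getD_foldl_modify_append, PySem.Dict.getD_empty,
    List.filter_map, List.map_map]
  simp [Function.comp_def]

lemma mem_posOf (rc : List Int) (nid : Int) (i : Int) :
    i ∈ (pvPosOf rc).getD nid [] ↔
      ∃ k : Nat, ∃ _ : k < rc.length, i = (k : Int) ∧ rc[k] = nid := by
  rw [posOf_getD]
  simp only [List.mem_map, List.mem_filter, PySem.List.mem_enumerate_iff]
  constructor
  · rintro ⟨p, ⟨⟨k, hk, rfl⟩, hpe⟩, rfl⟩
    refine ⟨k, hk, by push_cast; ring, ?_⟩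
    simpa using hpe
  · rintro ⟨k, hk, rfl, hv⟩
    exact ⟨((0 : Int) + k, rc[k]), ⟨⟨k, hk, rfl⟩, by simpa using hv⟩, by push_cast; ring⟩

-- ===== VERDICT (by name: the statement is the Claim_ definition above) =====
theorem range_to_bit_coverage_spec : Claim_equal_range_to_bit_coverage := by
  intro start end_ ttn rc _ _
  unfold Spec_range_to_bit_coverage range_to_bit_coverage range_to_bit_coverage_alt
  dsimp only
  rw [PySem.List.foldl_append_eq_flatMap, List.nil_append,
    foldl_foldl_eq_flatMap, foldl_foldl_eq_flatMap]
  set aligned := (PySem.List.pyRange start (end_ + 1) 1).flatMap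
    (fun token => (PySem.Dict.mk ttn).getD token []) with haligned
  set idxs := aligned.flatMap (fun node_id => (pvPosOf rc).getD node_id []) with hidxs
  have h0 : ∀ i ∈ idxs, 0 ≤ i := by
    intro i hi
    rw [hidxs, List.mem_flatMap] at hi
    obtain ⟨nid, _, hpos⟩ := hi
    rw [mem_posOf] at hpos
    obtain ⟨k, _, rfl, _⟩ := hpos
    exact Int.natCast_nonneg k
  have hmem : ∀ (j : Nat) (hj : j < rc.length), (((j : Int) ∈ idxs) ↔ rc[j]'hj ∈ aligned) := by
    intro j hj
    rw [hidxs, List.mem_flatMap]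
    constructor
    · rintro ⟨nid, hnid, hpos⟩
      rw [mem_posOf] at hpos
      obtain ⟨k, hk, hjk, hval⟩ := hpos
      have hkj : k = j := by omega
      subst hkj
      rw [hval]
      exact hnid
    · intro h
      exact ⟨rc[j], h, (mem_posOf rc _ _).mpr ⟨j, hj, rfl, rfl⟩⟩
  have hA := A_loop (fun nid => PySem.Set.contains (PySem.Set.ofList aligned) nid) rc 0
    (List.replicate rc.length '0') (by simp) (by simp)
  simp only [Nat.cast_zero, List.take_zero, List.nil_append] at hA
  rw [hA]
  refine congrArg String.mk ?_
  apply List.ext_getElem?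
  intro i
  by_cases hi : i < rc.length
  · rw [setfold_getElem? idxs _ h0 i (by simpa using hi)]
    have hrep : (List.replicate rc.length '0')[i]? = some '0' := by simp [hi]
    have hmap : (rc.map (fun nid =>
        if PySem.Set.contains (PySem.Set.ofList aligned) nid then '1' else '0'))[i]?
        = some (if PySem.Set.contains (PySem.Set.ofList aligned) rc[i] then '1' else '0') := by
      rw [List.getElem?_map, List.getElem?_eq_getElem hi]
      rfl
    by_cases hm : rc[i] ∈ aligned
    · have hc : PySem.Set.contains (PySem.Set.ofList aligned) rc[i] = true := by
        show List.contains _ _ = true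
        rw [List.contains_iff_mem]
        exact (PySem.Set.mem_ofList _ _).mpr hm
      rw [hmap, if_pos ((hmem i hi).mpr hm), hc]
      simp
    · have hc : PySem.Set.contains (PySem.Set.ofList aligned) rc[i] = false := by
        have : ¬ (rc[i] ∈ PySem.Set.ofList aligned) := fun h =>
          hm ((PySem.Set.mem_ofList _ _).mp h)
        show List.contains _ _ = false
        simpa [List.contains_iff_mem] using this
      have hnm : ¬ ((i : Int) ∈ idxs) := fun h => hm ((hmem i hi).mp h)
      rw [hmap, if_neg hnm, hrep, hc]
      simp
  · rw [List.getElem?_eq_none (by simpa using (by omega : rc.length ≤ i)),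
      List.getElem?_eq_none (by rw [setfold_length idxs _ h0]; simpa using (by omega : rc.length ≤ i))]
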